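-- pv_equiv track=rewrite | github.com/Nimdy/jarvis-oracle-edition | brain/reasoning/bounded_response.py | _parse_introspection_sections
-- ===== SOURCE A (Python) =====
-- _SECTION_CATEGORY: dict[str, str] = {
--     "consciousness metrics": "current_state",
--     "current activity": "current_state",
--     "operating mode": "current_state",
--     "analytics": "health",
--     "performance": "health",
--     "system health": "health",
--     "quarantine": "health",
--     "architecture": "architecture",
--     "document library": "architecture",
--     "storage": "architecture",
--     "memory": "memory",
--     "cortex": "memory",
--     "dream": "memory",
--     "evolution metrics": "evolution",
--     "observer metrics": "evolution",
--     "recent thought records": "evolution",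
--     "self-modifications": "mutation",
--     "mutations": "mutation",
-- }
--
-- def _categorize_section(title: str) -> str:
--     title_lower = title.lower()
--     for key, cat in _SECTION_CATEGORY.items():
--         if key in title_lower:
--             return cat
--     return "other"
--
-- def _parse_introspection_sections(
--     text: str,
-- ) -> tuple[list[tuple[str, str, list[str]]], list[str]]:
--     """Parse === delimited introspection text into (category, title, kv_facts) tuples.
--
--     Returns (sections, parse_warnings).
--     """
--     sections: list[tuple[str, str, list[str]]] = []
--     warnings: list[str] = []
--     current_title = ""
--     current_lines: list[str] = []
--
--     for raw_line in (text or "").splitlines():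
--         line = raw_line.strip()
--         if not line:
--             continue
--         if line.startswith("===") and line.endswith("==="):
--             if current_title and current_lines:
--                 cat = _categorize_section(current_title)
--                 sections.append((cat, current_title, current_lines))
--             current_title = line.strip("= ").strip()
--             current_lines = []
--             continue
--         if ":" in line and not line.startswith("http"):
--             current_lines.append(line)
--         elif not line.startswith("  "):
--             current_lines.append(line)
--
--     if current_title and current_lines:
--         cat = _categorize_section(current_title)
--         sections.append((cat, current_title, current_lines))
--
--     if not sections and text and text.strip():
--         warnings.append("no_sections_parsed")
--
--     return sections, warnings
-- ===== SOURCE B (Python) =====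
-- _SECTION_CATEGORY: dict[str, str] = {
--     "consciousness metrics": "current_state",
--     "current activity": "current_state",
--     "operating mode": "current_state",
--     "analytics": "health",
--     "performance": "health",
--     "system health": "health",
--     "quarantine": "health",
--     "architecture": "architecture",
--     "document library": "architecture",
--     "storage": "architecture",
--     "memory": "memory",
--     "cortex": "memory",
--     "dream": "memory",
--     "evolution metrics": "evolution",
--     "observer metrics": "evolution",
--     "recent thought records": "evolution",
--     "self-modifications": "mutation",
--     "mutations": "mutation",
-- }
--
-- def _categorize_section(title: str) -> str:
--     title_lower = title.lower()
--     for key, cat in _SECTION_CATEGORY.items():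
--         if key in title_lower:
--             return cat
--     return "other"
--
-- def _parse_introspection_sections(
--     text: str,
-- ) -> tuple[list[tuple[str, str, list[str]]], list[str]]:
--     """Two-phase: partition stripped non-empty lines into sections, then emit."""
--     src = text or ""
--     stripped = [s for s in (ln.strip() for ln in src.splitlines()) if s]
--     # Phase 1: partition at delimiter lines; lines before the first delimiter are dropped.
--     raw_sections: list[tuple[str, list[str]]] = []
--     for ln in stripped:
--         if ln.startswith("===") and ln.endswith("==="):
--             raw_sections.append((ln.strip("= ").strip(), []))
--         elif raw_sections:
--             raw_sections[-1][1].append(ln)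
--     # Phase 2: emit categorized tuples for sections with a title and content.
--     sections = [
--         (_categorize_section(t), t, body) for t, body in raw_sections if t and body
--     ]
--     warnings = ["no_sections_parsed"] if not sections and src.strip() else []
--     return sections, warnings
-- ===== Notes on version B (the rewrite author's own statement) =====
-- stated objective: alternative
-- what changed: A's single stateful walk carrying (sections, current_title, current_lines) with flush-on-delimiter and a final flush is replaced by a two-phase decomposition: first partition the stripped non-empty lines into raw (title, body) sections at delimiter lines, then a separate emit pass filters out title-less or empty sections and attaches categories.
import Mathlib
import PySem

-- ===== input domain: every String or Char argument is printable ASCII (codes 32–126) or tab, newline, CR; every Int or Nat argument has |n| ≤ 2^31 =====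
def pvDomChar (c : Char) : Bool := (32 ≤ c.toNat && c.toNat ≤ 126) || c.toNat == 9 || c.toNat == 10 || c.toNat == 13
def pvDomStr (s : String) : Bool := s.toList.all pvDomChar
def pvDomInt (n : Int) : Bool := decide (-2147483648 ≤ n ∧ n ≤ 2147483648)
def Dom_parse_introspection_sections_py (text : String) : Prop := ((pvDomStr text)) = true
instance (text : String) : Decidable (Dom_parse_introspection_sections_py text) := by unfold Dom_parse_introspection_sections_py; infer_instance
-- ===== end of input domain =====

-- B replaces A's single stateful line-walk by a partition-into-sections pass followed by a
-- separate emit pass (objective: alternative decomposition, same cost).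

-- ===== PORT A =====

-- _SECTION_CATEGORY (module constant, a dict walked in insertion order)
def pvSectionCategory : List (String × String) :=
  [("consciousness metrics", "current_state"),
   ("current activity", "current_state"),
   ("operating mode", "current_state"),
   ("analytics", "health"),
   ("performance", "health"),
   ("system health", "health"),
   ("quarantine", "health"),
   ("architecture", "architecture"),
   ("document library", "architecture"),
   ("storage", "architecture"),
   ("memory", "memory"),
   ("cortex", "memory"),
   ("dream", "memory"),
   ("evolution metrics", "evolution"),
   ("observer metrics", "evolution"),
   ("recent thought records", "evolution"),
   ("self-modifications", "mutation"),
   ("mutations", "mutation")]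

-- _categorize_section: 'for key, cat in _SECTION_CATEGORY.items(): if key in title_lower: return cat'
-- (identical helper in both Pythons; shared by both ports)
def pvCatLoop (titleLower : String) : List (String × String) → String
  | [] => "other"
  | (key, cat) :: rest =>
      if PySem.Str.isIn key titleLower then cat else pvCatLoop titleLower rest

def pvCategorize (title : String) : String :=
  pvCatLoop (PySem.Str.lower title) pvSectionCategory

-- line.startswith("===") and line.endswith("===")   (same expression in both Pythons)
def pvIsDelim (line : String) : Bool :=
  PySem.Str.startswith line "===" && PySem.Str.endswith line "==="

-- line.strip("= ").strip()   (same expression in both Pythons)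
def pvTitleOf (line : String) : String :=
  PySem.Str.strip (PySem.Str.stripChars line "= ")

-- A's for-loop: state (sections, current_title, current_lines)
def pvALoop : List String → List (String × String × List String) → String → List String →
    List (String × String × List String) × String × List String
  | [], secs, title, lines => (secs, title, lines)
  | raw :: rest, secs, title, lines =>
      let line := PySem.Str.strip raw
      if line == "" then pvALoop rest secs title lines
      else if pvIsDelim line then
        pvALoop rest
          (if !(title == "") && !lines.isEmpty then
             secs ++ [(pvCategorize title, title, lines)] else secs)
          (pvTitleOf line) []
      else if PySem.Str.isIn ":" line && !PySem.Str.startswith line "http" then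
        pvALoop rest secs title (lines ++ [line])
      else if !PySem.Str.startswith line "  " then
        pvALoop rest secs title (lines ++ [line])
      else
        pvALoop rest secs title lines

-- (text or "") = text for a String argument
def parse_introspection_sections_py (text : String) :
    (List (String × String × List String)) × List String :=
  let st := pvALoop (PySem.Str.splitlines text) [] "" []
  let secs :=
    if !(st.2.1 == "") && !st.2.2.isEmpty then
      st.1 ++ [(pvCategorize st.2.1, st.2.1, st.2.2)] else st.1
  let warnings :=
    if secs.isEmpty && !(text == "") && !(PySem.Str.strip text == "") then
      ["no_sections_parsed"] else []
  (secs, warnings)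

-- ===== PORT B =====

-- raw_sections[-1][1].append(ln)
def pvAppendLast : List (String × List String) → String → List (String × List String)
  | [], _ => []
  | [(t, body)], ln => [(t, body ++ [ln])]
  | s :: rest, ln => s :: pvAppendLast rest ln

-- phase 1: partition stripped non-empty lines at delimiter lines
def pvBLoop : List String → List (String × List String) → List (String × List String)
  | [], acc => acc
  | ln :: rest, acc =>
      if pvIsDelim ln then pvBLoop rest (acc ++ [(pvTitleOf ln, [])])
      else if !acc.isEmpty then pvBLoop rest (pvAppendLast acc ln)
      else pvBLoop rest acc

-- phase 2: emit categorized tuples for sections with a title and content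
def pvEmit (l : List (String × List String)) : List (String × String × List String) :=
  (l.filter fun s => !(s.1 == "") && !s.2.isEmpty).map fun s => (pvCategorize s.1, s.1, s.2)

def parse_introspection_sections_py_alt (text : String) :
    (List (String × String × List String)) × List String :=
  let stripped := ((PySem.Str.splitlines text).map PySem.Str.strip).filter fun s => !(s == "")
  let secs := pvEmit (pvBLoop stripped [])
  let warnings := if secs.isEmpty && !(PySem.Str.strip text == "") then ["no_sections_parsed"] else []
  (secs, warnings)

-- ===== PRECONDITION & SPEC =====
def Spec_parse_introspection_sections_py (text : String) (out : (List (String × String × List String)) × List String) : Prop := out = parse_introspection_sections_py_alt text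
instance (text : String) (out : (List (String × String × List String)) × List String) : Decidable (Spec_parse_introspection_sections_py text out) := by unfold Spec_parse_introspection_sections_py; infer_instance

-- ===== CLAIM (what is proved, stated in full; the proofs are below) =====
def Claim_equal_parse_introspection_sections_py : Prop := ∀ (text : String), Dom_parse_introspection_sections_py text → Spec_parse_introspection_sections_py text (parse_introspection_sections_py text)

-- ===== LEMMAS AND PROOFS =====

-- A's loop over stripped non-empty lines, with the two content branches collapsed
-- (a stripped non-empty line never starts with two spaces)
def pvA2 : List String → List (String × String × List String) → String → List String →
    List (String × String × List String) × String × List String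
  | [], secs, title, lines => (secs, title, lines)
  | line :: rest, secs, title, lines =>
      if pvIsDelim line then
        pvA2 rest
          (if !(title == "") && !lines.isEmpty then
             secs ++ [(pvCategorize title, title, lines)] else secs)
          (pvTitleOf line) []
      else pvA2 rest secs title (lines ++ [line])

lemma chars_strip_head (l : List Char) (c : Char) (t : List Char)
    (h : PySem.Chars.strip l = c :: t) : PySem.Chars.isspace c = false := by
  have hpre : PySem.Chars.strip l <+: PySem.Chars.lstrip l := by
    simp only [PySem.Chars.strip, PySem.Chars.rstrip]
    conv_rhs => rw [← List.reverse_reverse (PySem.Chars.lstrip l)]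
    exact List.reverse_prefix.mpr (List.dropWhile_suffix _)
  obtain ⟨u, hu⟩ := hpre
  rw [h] at hu
  have h2 : List.dropWhile PySem.Chars.isspace l = c :: (t ++ u) := by
    simpa [PySem.Chars.lstrip] using hu.symm
  have := List.head_dropWhile_not PySem.Chars.isspace (l := l) (by simp [h2] : _ ≠ [])
  simp [h2] at this; simpa using this

lemma strip_no_two_spaces (s : String) (h : ¬ PySem.Str.strip s = "") :
    PySem.Str.startswith (PySem.Str.strip s) "  " = false := by
  have hl : ¬ (PySem.Chars.strip s.toList) = [] := by
    intro hnil
    exact h (String.toList_eq_nil_iff.mp (by rw [PySem.Str.toList_strip]; exact hnil))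
  have heq : PySem.Str.startswith (PySem.Str.strip s) "  " =
      PySem.Chars.startswith (PySem.Chars.strip s.toList) [' ', ' '] := by
    simp [PySem.Str.startswith_eq]
  rw [heq]
  rcases hcs : PySem.Chars.strip s.toList with _ | ⟨c, t⟩
  · exact absurd hcs hl
  · have hc := chars_strip_head s.toList c t hcs
    by_contra hb
    simp only [Bool.not_eq_false, PySem.Chars.startswith] at hb
    rcases t with _ | ⟨c2, t2⟩
    · simp [List.isPrefixOf] at hb
    · simp [List.isPrefixOf] at hb
      obtain ⟨h1, -⟩ := hb
      rw [← h1] at hc; simp [PySem.Chars.isspace] at hc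

lemma pvALoop_eq_pvA2 (raws : List String) (secs : List (String × String × List String))
    (title : String) (lines : List String) :
    pvALoop raws secs title lines =
      pvA2 (((raws.map PySem.Str.strip).filter fun s => !(s == "")) ) secs title lines := by
  induction raws generalizing secs title lines with
  | nil => rfl
  | cons raw rest ih =>
      simp only [pvALoop, List.map_cons, List.filter_cons]
      by_cases h0 : PySem.Str.strip raw = ""
      · simp [h0, ih]
      · have h0' : (PySem.Str.strip raw == "") = false := by simpa using h0
        simp only [h0', Bool.not_false, if_true, Bool.false_eq_true, if_false]
        by_cases hd : pvIsDelim (PySem.Str.strip raw)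
        · simp [pvA2, hd, ih]
        · have hsp := strip_no_two_spaces raw h0
          have hsp' : PySem.Chars.startswith (PySem.Chars.strip raw.toList) [' ', ' '] = false := by
            simpa using hsp
          by_cases hc : (PySem.Str.isIn ":" (PySem.Str.strip raw) &&
              !PySem.Str.startswith (PySem.Str.strip raw) "http") = true
          · simp only [pvA2, hd, ih]
            simp
            intro h1 h2
            exact absurd h2 (by simp [hsp'])
          · simp only [pvA2, hd, ih]
            simp
            intro h1 h2
            exact absurd h2 (by simp [hsp'])

lemma pvAppendLast_append (done : List (String × List String)) (t : String)
    (body : List String) (ln : String) :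
    pvAppendLast (done ++ [(t, body)]) ln = done ++ [(t, body ++ [ln])] := by
  induction done with
  | nil => rfl
  | cons d ds ih =>
      rcases hds : ds ++ [(t, body)] with _ | ⟨y, ys⟩
      · simp at hds
      · simp only [List.cons_append, hds, pvAppendLast]
        rw [← hds, ih]

lemma pvBLoop_frozen (ls : List String) (done : List (String × List String))
    (cur : String × List String) :
    pvBLoop ls (done ++ [cur]) = done ++ pvBLoop ls [cur] := by
  induction ls generalizing done cur with
  | nil => simp [pvBLoop]
  | cons ln rest ih =>
      by_cases hd : pvIsDelim ln
      · simp only [pvBLoop, hd, if_true]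
        rw [List.append_assoc] at *
        rw [show done ++ ([cur] ++ [(pvTitleOf ln, [])]) = (done ++ [cur]) ++ [(pvTitleOf ln, [])] by simp,
            ih (done ++ [cur]) _, ih [cur] _]
        simp
      · obtain ⟨ct, cb⟩ := cur
        simp only [pvBLoop, hd, if_false, Bool.false_eq_true]
        have h1 : ((done ++ [(ct, cb)]).isEmpty) = false := by simp
        have h2 : (([(ct, cb)] : List (String × List String)).isEmpty) = false := by simp
        simp only [h1, h2, Bool.not_false, if_true]
        rw [pvAppendLast_append]
        have : pvAppendLast [(ct, cb)] ln = [(ct, cb ++ [ln])] := rfl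
        rw [this, ih]

lemma pvEmit_append (x y : List (String × List String)) :
    pvEmit (x ++ y) = pvEmit x ++ pvEmit y := by
  simp [pvEmit]

def pvFlush (st : List (String × String × List String) × String × List String) :
    List (String × String × List String) :=
  if !(st.2.1 == "") && !st.2.2.isEmpty then
    st.1 ++ [(pvCategorize st.2.1, st.2.1, st.2.2)] else st.1

lemma pvA2_vs_B (ls : List String) (secs : List (String × String × List String))
    (t : String) (body : List String) :
    pvFlush (pvA2 ls secs t body) = secs ++ pvEmit (pvBLoop ls [(t, body)]) := by
  induction ls generalizing secs t body with
  | nil =>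
      by_cases hc : (!(t == "") && !body.isEmpty) = true
      · simp [pvA2, pvBLoop, pvFlush, pvEmit, hc]
      · simp [pvA2, pvBLoop, pvFlush, pvEmit, hc]
  | cons ln rest ih =>
      by_cases hd : pvIsDelim ln
      · simp only [pvA2, pvBLoop, hd, if_true]
        rw [ih]
        rw [show ([(t, body)] ++ [(pvTitleOf ln, [])] : List (String × List String)) =
              [(t, body)] ++ [(pvTitleOf ln, [])] from rfl] at *
        rw [pvBLoop_frozen rest [(t, body)] (pvTitleOf ln, []), pvEmit_append]
        by_cases hc : (!(t == "") && !body.isEmpty) = true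
        · simp [pvEmit, hc]
        · simp [pvEmit, hc]
      · simp only [pvA2, pvBLoop, hd, if_false, Bool.false_eq_true]
        have h2 : (([(t, body)] : List (String × List String)).isEmpty) = false := by simp
        simp only [h2, Bool.not_false, if_true]
        have : pvAppendLast [(t, body)] ln = [(t, body ++ [ln])] := rfl
        rw [this, ih]

lemma pvA2_empty_title (ls : List String) (secs : List (String × String × List String))
    (lines : List String) :
    pvFlush (pvA2 ls secs "" lines) = secs ++ pvEmit (pvBLoop ls []) := by
  induction ls generalizing secs lines with
  | nil => simp [pvA2, pvBLoop, pvFlush, pvEmit]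
  | cons ln rest ih =>
      by_cases hd : pvIsDelim ln
      · simp only [pvA2, pvBLoop, hd, if_true]
        have : (!(("" : String) == "") && !lines.isEmpty) = false := by simp
        simp only [this, Bool.false_eq_true, if_false]
        rw [pvA2_vs_B]
        simp
      · simp only [pvA2, pvBLoop, hd, if_false, Bool.false_eq_true, List.isEmpty_nil,
          Bool.not_true]
        rw [ih]

-- ===== VERDICT (by name: the statement is the Claim_ definition above) =====
theorem parse_introspection_sections_py_spec : Claim_equal_parse_introspection_sections_py := by
  intro text _
  unfold Spec_parse_introspection_sections_py parse_introspection_sections_py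
    parse_introspection_sections_py_alt
  have hsecs :
      pvFlush (pvALoop (PySem.Str.splitlines text) [] "" []) =
        pvEmit (pvBLoop (((PySem.Str.splitlines text).map PySem.Str.strip).filter
          fun s => !(s == "")) []) := by
    rw [pvALoop_eq_pvA2, pvA2_empty_title]; simp
  simp only [pvFlush] at hsecs
  dsimp only
  rw [hsecs]
  by_cases hs : PySem.Str.strip text = ""
  · simp [hs]
  · have htext : ¬ text = "" := by
      intro h0; exact hs (by rw [h0]; rfl)
    simp [hs, htext]
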